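-- pv_equiv track=rewrite | github.com/jasmultani5391/Hurricane-Analysis | Hurricane Analysis.py | counting_areas
-- ===== SOURCE A (Python) =====
-- def counting_areas(parameter):
--     recurring = []
--     unique_keys = []
--     for i in parameter:
--         for ii in i:
--             recurring.append(ii)
--             if ii not in unique_keys:
--                 unique_keys.append(ii)
--     return recurring, unique_keys
-- ===== SOURCE B (Python) =====
-- def counting_areas(parameter):
--     recurring = []
--     unique_keys = []
--     for row in reversed(parameter):
--         unique_keys = list(dict.fromkeys(row)) + [x for x in unique_keys if x not in row]
--         recurring = list(row) + recurring
--     return recurring, unique_keys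
-- ===== Notes on version B (the rewrite author's own statement) =====
-- stated objective: alternative
-- what changed: Replaces A's single left-to-right interleaved pass with a global seen-list by a back-to-front pass over the rows: each row is deduped locally and merged onto the already-processed suffix result by filtering out elements of the row, so there is no global 'seen' accumulator at all.
import Mathlib
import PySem

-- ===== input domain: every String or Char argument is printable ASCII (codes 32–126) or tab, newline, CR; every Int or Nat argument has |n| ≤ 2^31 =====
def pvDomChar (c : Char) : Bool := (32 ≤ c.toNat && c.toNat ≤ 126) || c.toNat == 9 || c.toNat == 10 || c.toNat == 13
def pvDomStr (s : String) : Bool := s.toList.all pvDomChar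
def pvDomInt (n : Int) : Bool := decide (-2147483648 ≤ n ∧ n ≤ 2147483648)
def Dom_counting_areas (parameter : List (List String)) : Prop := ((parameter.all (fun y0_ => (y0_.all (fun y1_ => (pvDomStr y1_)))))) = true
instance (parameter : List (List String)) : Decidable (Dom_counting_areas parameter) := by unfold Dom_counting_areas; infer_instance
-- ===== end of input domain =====

-- B replaces A's single interleaved pass with structural recursion on the rows, merging per-row dedups from the right (alternative decomposition, no global seen-list).


-- ===== PORT A =====
-- for i in parameter: for ii in i: recurring.append(ii); if ii not in unique_keys: unique_keys.append(ii)
def counting_areas (parameter : List (List String)) : List String × List String :=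
  parameter.foldl
    (fun st i =>
      i.foldl
        (fun st ii =>
          let recurring := st.1 ++ [ii]
          let unique_keys := if st.2.contains ii then st.2 else st.2 ++ [ii]
          (recurring, unique_keys))
        st)
    ([], [])

-- ===== PORT B =====
-- for row in reversed(parameter): unique_keys = dedup(row) + [x for x in unique_keys if x not in row]; recurring = row + recurring
def counting_areas_alt (parameter : List (List String)) : List String × List String :=
  parameter.reverse.foldl
    (fun st row =>
      (row ++ st.1, PySem.List.dedup row ++ st.2.filter (fun x => !row.contains x)))
    ([], [])

-- ===== PRECONDITION & SPEC =====
def Spec_counting_areas (parameter : List (List String)) (out : List String × List String) : Prop := out = counting_areas_alt parameter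
instance (parameter : List (List String)) (out : List String × List String) : Decidable (Spec_counting_areas parameter out) := by unfold Spec_counting_areas; infer_instance

-- ===== CLAIM (what is proved, stated in full; the proofs are below) =====
def Claim_equal_counting_areas : Prop := ∀ (parameter : List (List String)), Dom_counting_areas parameter → Spec_counting_areas parameter (counting_areas parameter)

-- ===== LEMMAS AND PROOFS =====
-- A's inner loop is exactly PySem.Set.update (fold of Set.add) on the unique_keys component.
theorem counting_areas_inner (l : List String) (r u : List String) :
    l.foldl
        (fun st ii =>
          let recurring := st.1 ++ [ii]
          let unique_keys := if st.2.contains ii then st.2 else st.2 ++ [ii]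
          (recurring, unique_keys))
        (r, u)
      = (r ++ l, PySem.Set.update u l) := by
  induction l generalizing r u with
  | nil => simp [PySem.Set.update]
  | cons x xs ih =>
      rw [List.foldl_cons, ih]
      simp [PySem.Set.update, PySem.Set.add, PySem.Set.contains]

theorem counting_areas_outer (rows : List (List String)) (r u : List String) :
    rows.foldl
        (fun st i =>
          i.foldl
            (fun st ii =>
              let recurring := st.1 ++ [ii]
              let unique_keys := if st.2.contains ii then st.2 else st.2 ++ [ii]
              (recurring, unique_keys))
            st)
        (r, u)
      = (r ++ rows.flatten, PySem.Set.update u rows.flatten) := by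
  induction rows generalizing r u with
  | nil => simp [PySem.Set.update]
  | cons x xs ih =>
      rw [List.foldl_cons, counting_areas_inner, ih]
      simp [PySem.Set.update, List.foldl_append]

-- B computes, at every node, (flatten, set(flatten)) of its suffix.
theorem counting_areas_alt_eq (rows : List (List String)) :
    counting_areas_alt rows = (rows.flatten, PySem.Set.ofList rows.flatten) := by
  induction rows with
  | nil => simp [counting_areas_alt]
  | cons h t ih =>
      unfold counting_areas_alt at ih ⊢
      rw [List.reverse_cons, List.foldl_append, ih]
      simp only [List.foldl_cons, List.foldl_nil, List.flatten_cons, Prod.mk.injEq, true_and]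
      have h1 : PySem.Set.ofList (h ++ t.flatten)
          = PySem.Set.update (PySem.Set.ofList h) t.flatten := by
        simp [PySem.Set.ofList_eq_foldl, PySem.Set.update, List.foldl_append]
      rw [h1, PySem.Set.update_eq_append_filter]
      simp only [PySem.List.dedup_eq_ofList]
      congr 1
      apply List.filter_congr
      intro x hx
      have : PySem.Set.contains (PySem.Set.ofList h) x = h.contains x := by
        by_cases hmem : x ∈ h
        · simp [PySem.Set.contains_eq_listContains, PySem.Set.mem_ofList, hmem]
        · simp [PySem.Set.contains_eq_listContains, PySem.Set.mem_ofList, hmem]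
      rw [this]

-- ===== VERDICT (by name: the statement is the Claim_ definition above) =====
theorem counting_areas_spec : Claim_equal_counting_areas := by
  intro p _
  unfold Spec_counting_areas counting_areas
  rw [counting_areas_outer, counting_areas_alt_eq]
  simp [PySem.Set.update, PySem.Set.ofList_eq_foldl]
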